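-- pv_equiv track=rewrite | github.com/antonioarista/GINtelligence_test_backend | server/palindromeGenerator.py | getAllPalindromesInRange
-- ===== SOURCE A (Python) =====
-- def isPalindrome(strToCheck):
--     result = True;                                       #Colocamos la bandera en True desde el inicio.
--     length = len(strToCheck)                             #Calculamos una sola vez la longitud con len()
--     stopCriteria = int(length/2)                         #Obtenemos una sola vez el criterio de paro del ciclo.
--     for i in range(0,stopCriteria):                      #Utilizamos un ciclo con range para ser lo mas rápidos posibles.
--         if(strToCheck[i] != strToCheck[(length-1)-i]):   #En el momento en que la condición de palíndromo se rompe.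
--             result = False;                              #Colocamos la bandera en false y rompemos el procesamiento.
--             break;
--     return result;
--
-- def isDoubleBasePalindrome(valueToCheck):
--     result = False
--     if isPalindrome(str(valueToCheck)):                #Solamente si esta condición de base 10 se cumple...
--         if isPalindrome(bin(valueToCheck)[2:]):        #revisamos si la función es palíndroma en binario (bin(valueToCheck[2:])
--             result = True
--     return result
--
-- def getAllPalindromesInRange(rangeToUse):
--     sumOfAllPalindromes = 0
--     colOfAllPalindromes = []
--     colOfAllPalindromes_binary = []
--     for counter in range(0,rangeToUse+1):
--         if(isDoubleBasePalindrome(counter)):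
--             sumOfAllPalindromes += counter
--             colOfAllPalindromes.append(counter)
--             colOfAllPalindromes_binary.append(bin(counter)[2:])
--     return sumOfAllPalindromes, colOfAllPalindromes, colOfAllPalindromes_binary
-- ===== SOURCE B (Python) =====
-- def _revdigits(v, base):
--     r = 0
--     while v > 0:
--         r = r * base + v % base
--         v //= base
--     return r
--
-- def getAllPalindromesInRange(rangeToUse):
--     pals = [v for v in range(rangeToUse + 1)
--             if _revdigits(v, 10) == v and _revdigits(v, 2) == v]
--     return sum(pals), pals, [bin(v)[2:] for v in pals]
-- ===== Notes on version B (the rewrite author's own statement) =====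
-- stated objective: alternative
-- what changed: Replaces A's per-number string palindrome tests (build str(v)/bin(v) and compare mirrored characters in an index half-loop) with a purely arithmetic digit-reversal fixed-point check (r = r*base + v%base), and builds the result by filter + sum + map instead of one loop accumulating three values.
import Mathlib
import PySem

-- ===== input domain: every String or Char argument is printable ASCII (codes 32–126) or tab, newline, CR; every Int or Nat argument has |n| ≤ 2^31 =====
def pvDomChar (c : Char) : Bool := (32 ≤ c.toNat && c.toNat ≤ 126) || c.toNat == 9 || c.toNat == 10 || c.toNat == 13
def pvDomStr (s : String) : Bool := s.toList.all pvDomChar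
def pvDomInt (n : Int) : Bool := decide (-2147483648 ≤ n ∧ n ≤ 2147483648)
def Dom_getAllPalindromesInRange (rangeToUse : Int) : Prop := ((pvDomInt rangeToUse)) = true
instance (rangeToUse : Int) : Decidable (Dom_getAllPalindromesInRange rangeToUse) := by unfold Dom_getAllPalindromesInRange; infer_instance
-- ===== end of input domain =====

-- B replaces A's per-number string palindrome tests (index half-loop over the decimal and
-- binary strings) by a purely arithmetic digit-reversal check, and builds the result as
-- filter + sum + map instead of one accumulating loop (objective: alternative algorithm).

-- ===== PORT A =====
-- A's 'for i in range(0, stopCriteria): if s[i] != s[length-1-i]: result = False; break'.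
-- The indices are always in range, so pyGetD's default is never consulted (exact).
def isPalindromeGo (cs : List Char) (length : Int) : List Int → Bool
  | [] => true
  | i :: rest =>
      if PySem.List.pyGetD cs i ' ' ≠ PySem.List.pyGetD cs ((length - 1) - i) ' ' then false
      else isPalindromeGo cs length rest

def isPalindrome (strToCheck : String) : Bool :=
  let length : Int := PySem.Str.len strToCheck
  -- int(length/2): length ≥ 0 here, so float truncation equals floor division (exact)
  let stopCriteria : Int := PySem.Int.floordiv length 2
  isPalindromeGo strToCheck.toList length (PySem.List.pyRange 0 stopCriteria 1)

def isDoubleBasePalindrome (valueToCheck : Int) : Bool :=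
  if isPalindrome (PySem.Int.toStr valueToCheck) then
    if isPalindrome (PySem.Str.slice (PySem.Int.pyBin valueToCheck) (some 2) none) then true
    else false
  else false

def getAllPalindromesInRange (rangeToUse : Int) : Int × List Int × List String :=
  (PySem.List.pyRange 0 (rangeToUse + 1) 1).foldl
    (fun acc counter =>
      if isDoubleBasePalindrome counter then
        (acc.1 + counter, acc.2.1 ++ [counter],
         acc.2.2 ++ [PySem.Str.slice (PySem.Int.pyBin counter) (some 2) none])
      else acc)
    (0, [], [])

-- ===== PORT B =====
-- Source B's '_revdigits(v, base)': while v > 0: r = r*base + v%base; v //= base.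
-- Fuel recursion; v+1 steps always suffice for the bases used (≥ 2), so the fuel
-- guard only makes the same computation total.
def revdigitsGo (base : Int) : Nat → Int → Int → Int
  | 0, _, r => r
  | fuel + 1, v, r =>
      if 0 < v then revdigitsGo base fuel (PySem.Int.floordiv v base) (r * base + PySem.Int.mod v base)
      else r

def revdigits (v : Int) (base : Int) : Int := revdigitsGo base (v.toNat + 1) v 0

def getAllPalindromesInRange_alt (rangeToUse : Int) : Int × List Int × List String :=
  let pals := (PySem.List.pyRange 0 (rangeToUse + 1) 1).filter
    (fun v => revdigits v 10 == v && revdigits v 2 == v)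
  (pals.foldl (· + ·) 0, pals, pals.map (fun v => PySem.Str.slice (PySem.Int.pyBin v) (some 2) none))

-- ===== PRECONDITION & SPEC =====
def Spec_getAllPalindromesInRange (rangeToUse : Int) (out : Int × List Int × List String) : Prop := out = getAllPalindromesInRange_alt rangeToUse
instance (rangeToUse : Int) (out : Int × List Int × List String) : Decidable (Spec_getAllPalindromesInRange rangeToUse out) := by unfold Spec_getAllPalindromesInRange; infer_instance

-- ===== CLAIM (what is proved, stated in full; the proofs are below) =====
def Claim_equal_getAllPalindromesInRange : Prop := ∀ (rangeToUse : Int), Dom_getAllPalindromesInRange rangeToUse → Spec_getAllPalindromesInRange rangeToUse (getAllPalindromesInRange rangeToUse)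

-- ===== LEMMAS AND PROOFS =====

-- Nat.toDigits (what str(n)/bin(n) print) characterized by Nat.digits.
lemma toDigitsCore_eq (b : Nat) (hb : 1 < b) :
    ∀ (fuel n : Nat) (acc : List Char), 0 < n → n ≤ fuel →
      Nat.toDigitsCore b fuel n acc = ((Nat.digits b n).reverse.map Nat.digitChar) ++ acc := by
  intro fuel
  induction fuel with
  | zero => intro n acc h1 h2; omega
  | succ f ih =>
    intro n acc h1 h2
    rw [Nat.toDigitsCore]
    have hd := Nat.digits_def' hb h1
    by_cases h0 : n / b = 0
    · have hnb : n < b := (Nat.div_eq_zero_iff_lt (by omega)).mp h0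
      simp [h0, hd, Nat.mod_eq_of_lt hnb]
    · have hlt : n / b < n := Nat.div_lt_self h1 hb
      simp only [h0, if_false]
      rw [ih (n / b) _ (Nat.pos_of_ne_zero h0) (by omega), hd]
      simp

lemma toDigits_eq (b : Nat) (hb : 1 < b) (n : Nat) (hn : 0 < n) :
    Nat.toDigits b n = (Nat.digits b n).reverse.map Nat.digitChar := by
  rw [Nat.toDigits, toDigitsCore_eq b hb (n+1) n [] hn (by omega)]; simp

lemma map_digitChar_inj : ∀ (l1 l2 : List Nat), (∀ x ∈ l1, x < 10) → (∀ x ∈ l2, x < 10) →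
    l1.map Nat.digitChar = l2.map Nat.digitChar → l1 = l2 := by
  have dinj : ∀ x < 10, ∀ y < 10, Nat.digitChar x = Nat.digitChar y → x = y := by decide
  intro l1
  induction l1 with
  | nil => intro l2 _ _ h; cases l2 <;> simp_all
  | cons x t ih =>
    intro l2 h1 h2 h
    cases l2 with
    | nil => simp_all
    | cons y t2 =>
      simp only [List.map_cons, List.cons.injEq] at h
      have hx := dinj x (h1 x (by simp)) y (h2 y (by simp)) h.1
      have := ih t2 (fun z hz => h1 z (by simp [hz])) (fun z hz => h2 z (by simp [hz])) h.2
      simp [hx, this]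

-- checking the first half of a list against the mirrored second half is the full palindrome condition
lemma half_palindrome_iff (cs : List Char)
    (h : ∀ k, k < cs.length / 2 → cs[k]? = cs[cs.length - 1 - k]?) :
    cs.reverse = cs := by
  apply List.ext_getElem?
  intro i
  by_cases hi : i < cs.length
  · rw [List.getElem?_reverse hi]
    rcases Nat.lt_or_ge i (cs.length / 2) with h1 | h1
    · exact (h i h1).symm
    · by_cases heq : cs.length - 1 - i = i
      · rw [heq]
      · have h2 : cs.length - 1 - i < cs.length / 2 := by omega
        have := h _ h2
        have h3 : cs.length - 1 - (cs.length - 1 - i) = i := by omega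
        rw [h3] at this
        exact this
  · rw [List.getElem?_eq_none (by simpa using Nat.le_of_not_lt hi),
        List.getElem?_eq_none (by omega)]

lemma isPalindromeGo_eq_all (cs : List Char) (length : Int) (idxs : List Int) :
    isPalindromeGo cs length idxs
      = idxs.all (fun i => PySem.List.pyGetD cs i ' ' == PySem.List.pyGetD cs ((length - 1) - i) ' ') := by
  induction idxs with
  | nil => rfl
  | cons i rest ih =>
    rw [isPalindromeGo, List.all_cons, ← ih]
    by_cases h : PySem.List.pyGetD cs i ' ' = PySem.List.pyGetD cs ((length - 1) - i) ' ' <;> simp [h]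

lemma isPalindrome_iff (s : String) : isPalindrome s = true ↔ s.toList.reverse = s.toList := by
  have hlen : PySem.Str.len s = (s.toList.length : Int) := by simp
  have hstop : PySem.Int.floordiv (s.toList.length : Int) 2 = ((s.toList.length / 2 : Nat) : Int) := by
    rw [PySem.Int.floordiv, Int.fdiv_eq_ediv]
    simp
  rw [isPalindrome]
  simp only [hlen, hstop]
  rw [isPalindromeGo_eq_all, PySem.List.pyRange_one]
  rw [List.all_map, List.all_eq_true]
  have key : ∀ k : Nat, k < s.toList.length / 2 →
      ((PySem.List.pyGetD s.toList (k : Int) ' ' == PySem.List.pyGetD s.toList ((s.toList.length : Int) - 1 - (k : Int)) ' ') = true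
        ↔ s.toList[k]? = s.toList[s.toList.length - 1 - k]?) := by
    intro k hk
    have hk1 : k < s.toList.length := by omega
    have hk2 : s.toList.length - 1 - k < s.toList.length := by omega
    have hidx : ((s.toList.length : Int) - 1 - (k : Int)) = ((s.toList.length - 1 - k : Nat) : Int) := by
      omega
    rw [hidx]
    simp only [PySem.List.pyGetD_natCast, beq_iff_eq, List.getD_eq_getElem?_getD,
      List.getElem?_eq_getElem hk1, List.getElem?_eq_getElem hk2, Option.getD_some,
      Option.some.injEq]
  constructor
  · intro h
    apply half_palindrome_iff
    intro k hk
    have hmem : k ∈ List.range (((s.toList.length / 2 : Nat) : Int) - 0).toNat := by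
      rw [List.mem_range]; omega
    have := h k hmem
    simp only [Function.comp, zero_add] at this
    exact (key k hk).mp this
  · intro hrev k hmem
    rw [List.mem_range] at hmem
    have hk : k < s.toList.length / 2 := by omega
    have hk1 : k < s.toList.length := by omega
    simp only [Function.comp, zero_add]
    apply (key k hk).mpr
    conv_lhs => rw [← hrev]
    rw [List.getElem?_reverse hk1]

-- what Source B's while-loop computes
lemma revdigitsGo_eq (b : Nat) (hb : 1 < b) :
    ∀ (fuel : Nat) (n : Nat) (r : Int), n ≤ fuel →
      revdigitsGo (b : Int) fuel (n : Int) r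
        = r * (b : Int) ^ (Nat.digits b n).length + ((Nat.ofDigits b (Nat.digits b n).reverse : Nat) : Int) := by
  intro fuel
  induction fuel with
  | zero =>
    intro n r h
    have : n = 0 := by omega
    subst this
    simp [revdigitsGo, Nat.ofDigits_nil]
  | succ f ih =>
    intro n r h
    rw [revdigitsGo]
    by_cases hn : 0 < n
    · have hpos : (0 : Int) < (n : Int) := by exact_mod_cast hn
      rw [if_pos hpos]
      have hfd : PySem.Int.floordiv (n : Int) (b : Int) = ((n / b : Nat) : Int) := by
        rw [PySem.Int.floordiv, Int.fdiv_eq_ediv]; simp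
      have hmd : PySem.Int.mod (n : Int) (b : Int) = ((n % b : Nat) : Int) := by
        rw [PySem.Int.mod, Int.fmod_eq_emod]; omega
      rw [hfd, hmd, ih (n / b) _ (by have := Nat.div_lt_self hn hb; omega)]
      rw [Nat.digits_def' hb hn, List.reverse_cons]
      push_cast [Nat.ofDigits_append, Nat.ofDigits_singleton]
      simp only [List.length_cons, List.length_reverse, pow_succ]
      ring
    · have : n = 0 := by omega
      subst this
      simp [Nat.ofDigits_nil]

lemma revdigits_eq (b : Nat) (hb : 1 < b) (n : Nat) :
    revdigits (n : Int) (b : Int) = ((Nat.ofDigits b (Nat.digits b n).reverse : Nat) : Int) := by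
  rw [revdigits, Int.toNat_natCast, revdigitsGo_eq b hb (n+1) n 0 (by omega)]
  simp

-- the numeric reversal is a fixed point exactly on digit-palindromes
lemma ofDigits_reverse_eq_iff (b : Nat) (hb : 1 < b) (n : Nat) :
    Nat.ofDigits b (Nat.digits b n).reverse = n ↔ (Nat.digits b n).reverse = Nat.digits b n := by
  constructor
  · intro h
    by_cases hn : n = 0
    · subst hn; simp
    · have hne : Nat.digits b n ≠ [] := Nat.digits_ne_nil_iff_ne_zero.mpr hn
      have hrne : (Nat.digits b n).reverse ≠ [] := by simpa using hne
      have hlt : ∀ x ∈ (Nat.digits b n).reverse, x < b := by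
        intro x hx; exact Nat.digits_lt_base hb (List.mem_reverse.mp hx)
      by_cases hlast : (Nat.digits b n).reverse.getLast hrne = 0
      · exfalso
        have hdrop : (Nat.digits b n).reverse
            = (Nat.digits b n).reverse.dropLast ++ [(Nat.digits b n).reverse.getLast hrne] :=
          (List.dropLast_append_getLast hrne).symm
        have hbound : Nat.ofDigits b (Nat.digits b n).reverse
            < b ^ ((Nat.digits b n).reverse.dropLast.length) := by
          rw [hdrop, Nat.ofDigits_append, hlast]
          have := Nat.ofDigits_lt_base_pow_length hb
            (l := (Nat.digits b n).reverse.dropLast)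
            (fun x hx => hlt x (List.mem_of_mem_dropLast hx))
          simpa using this
        have hlen : (Nat.digits b n).reverse.dropLast.length = (Nat.digits b n).length - 1 := by
          simp
        have hge : b ^ ((Nat.digits b n).length - 1) ≤ n := by
          rw [← Nat.lt_digits_length_iff hb]
          have h1 : 1 ≤ (Nat.digits b n).length := by
            cases h' : Nat.digits b n with
            | nil => exact absurd h' hne
            | cons a t => simp
          omega
        rw [hlen] at hbound
        omega
      · have := Nat.digits_ofDigits b hb _ hlt (fun _ => hlast)
        rw [h] at this
        exact this.symm
  · intro h; rw [h, Nat.ofDigits_digits]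

lemma toDigits_palindrome_iff (b : Nat) (hb : 1 < b) (hb10 : b ≤ 10) (n : Nat) :
    (Nat.toDigits b n).reverse = Nat.toDigits b n
      ↔ Nat.ofDigits b (Nat.digits b n).reverse = n := by
  by_cases hn : n = 0
  · subst hn
    simp
  · rw [toDigits_eq b hb n (Nat.pos_of_ne_zero hn)]
    rw [ofDigits_reverse_eq_iff b hb n]
    have hd : ∀ x ∈ Nat.digits b n, x < 10 :=
      fun x hx => lt_of_lt_of_le (Nat.digits_lt_base hb hx) hb10
    rw [← List.map_reverse, List.reverse_reverse]
    constructor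
    · intro h
      exact (map_digitChar_inj _ _ hd (by simpa using hd) h).symm
    · intro h
      rw [h]

-- the two per-element checks agree for v ≥ 0
lemma cond_eq (v : Int) (hv : 0 ≤ v) :
    isDoubleBasePalindrome v = (revdigits v 10 == v && revdigits v 2 == v) := by
  obtain ⟨n, rfl⟩ : ∃ n : Nat, v = (n : Int) := ⟨v.toNat, (Int.toNat_of_nonneg hv).symm⟩
  have h10 : ((10 : Nat) : Int) = (10 : Int) := by norm_num
  have h2 : ((2 : Nat) : Int) = (2 : Int) := by norm_num
  have hstr : (PySem.Int.toStr (n : Int)).toList = Nat.toDigits 10 n := by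
    rw [PySem.Int.toList_toStr, PySem.Int.toChars]
    simp
  have hbin : (PySem.Str.slice (PySem.Int.pyBin (n : Int)) (some 2) none).toList
      = Nat.toDigits 2 n := by
    rw [PySem.Str.toList_slice, PySem.Int.toList_pyBin, PySem.Int.toBinChars0b]
    rw [if_neg (by omega : ¬((n : Int) < 0))]
    rw [PySem.Chars.slice_eq_listSlice, PySem.List.slice_from _ (by norm_num : (0:Int) ≤ 2)]
    simp
  have p10 : isPalindrome (PySem.Int.toStr (n : Int)) = (revdigits (n : Int) 10 == (n : Int)) := by
    rcases Bool.eq_false_or_eq_true (isPalindrome (PySem.Int.toStr (n : Int))) with h | h <;>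
      rw [h]
    · symm
      rw [beq_iff_eq]
      rw [isPalindrome_iff, hstr, toDigits_palindrome_iff 10 (by omega) (by omega)] at h
      rw [← h10, revdigits_eq 10 (by omega) n]
      exact_mod_cast h
    · symm
      rw [beq_eq_false_iff_ne]
      intro hc
      have : isPalindrome (PySem.Int.toStr (n : Int)) = true := by
        rw [isPalindrome_iff, hstr, toDigits_palindrome_iff 10 (by omega) (by omega)]
        rw [← h10] at hc
        rw [revdigits_eq 10 (by omega) n] at hc
        exact_mod_cast hc
      simp [this] at h
  have p2 : isPalindrome (PySem.Str.slice (PySem.Int.pyBin (n : Int)) (some 2) none)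
      = (revdigits (n : Int) 2 == (n : Int)) := by
    rcases Bool.eq_false_or_eq_true
        (isPalindrome (PySem.Str.slice (PySem.Int.pyBin (n : Int)) (some 2) none)) with h | h <;>
      rw [h]
    · symm
      rw [beq_iff_eq]
      rw [isPalindrome_iff, hbin, toDigits_palindrome_iff 2 (by omega) (by omega)] at h
      rw [← h2, revdigits_eq 2 (by omega) n]
      exact_mod_cast h
    · symm
      rw [beq_eq_false_iff_ne]
      intro hc
      have : isPalindrome (PySem.Str.slice (PySem.Int.pyBin (n : Int)) (some 2) none) = true := by
        rw [isPalindrome_iff, hbin, toDigits_palindrome_iff 2 (by omega) (by omega)]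
        rw [← h2] at hc
        rw [revdigits_eq 2 (by omega) n] at hc
        exact_mod_cast hc
      simp [this] at h
  rw [isDoubleBasePalindrome, p10, p2]
  rcases Bool.eq_false_or_eq_true (revdigits (n : Int) 10 == (n : Int)) with h1 | h1 <;>
    rcases Bool.eq_false_or_eq_true (revdigits (n : Int) 2 == (n : Int)) with h2' | h2' <;>
    simp [h1, h2']

-- A's single accumulating pass equals B's filter + sum + map decomposition
lemma fold_eq_filter (p : Int → Bool) (f : Int → String) :
    ∀ (xs : List Int) (s : Int) (l : List Int) (bl : List String),
      xs.foldl (fun acc v => if p v then (acc.1 + v, acc.2.1 ++ [v], acc.2.2 ++ [f v]) else acc) (s, l, bl)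
        = (s + (xs.filter p).sum, l ++ xs.filter p, bl ++ (xs.filter p).map f) := by
  intro xs
  induction xs with
  | nil => simp
  | cons x t ih =>
    intro s l bl
    rw [List.foldl_cons]
    by_cases hx : p x
    · simp only [hx, if_true, List.filter_cons_of_pos hx, ih]
      simp [add_assoc]
    · have hx' : p x = false := by simp [hx]
      simp [hx', ih]

-- ===== VERDICT (by name: the statement is the Claim_ definition above) =====
theorem getAllPalindromesInRange_spec : Claim_equal_getAllPalindromesInRange := by
  intro r _hdom
  unfold Spec_getAllPalindromesInRange
  rw [getAllPalindromesInRange, getAllPalindromesInRange_alt]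
  rw [PySem.List.foldl_congr_mem _ _
    (fun acc v =>
      if (revdigits v 10 == v && revdigits v 2 == v) then
        (acc.1 + v, acc.2.1 ++ [v], acc.2.2 ++ [PySem.Str.slice (PySem.Int.pyBin v) (some 2) none])
      else acc) _
    (by
      intro acc x hx
      have hx0 : 0 ≤ x := (PySem.List.mem_pyRange_one.mp hx).1
      rw [cond_eq x hx0])]
  rw [fold_eq_filter (fun v => revdigits v 10 == v && revdigits v 2 == v)
    (fun v => PySem.Str.slice (PySem.Int.pyBin v) (some 2) none)]
  have hsum : ∀ ys : List Int, ys.foldl (· + ·) 0 = ys.sum := by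
    intro ys
    have := PySem.List.foldl_add ys (fun x => x) 0
    simpa using this
  simp [hsum]
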